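-- pv_equiv track=rewrite | github.com/SanchitKulkarni1/gitEQ | backend/app/stress/stress_propagation.py | propagate_stress
-- ===== SOURCE A (Python) =====
-- from collections import deque
-- from typing import List, Dict, Set, Tuple
--
-- def propagate_stress(
--     dep_graph: dict,
--     start_nodes: list,
--     max_depth: int = 3,
--     propagation_type: str = "traffic"
-- ) -> List[str]:
--     """
--     Breadth-first stress propagation through dependency graph.
--
--     Args:
--         dep_graph: Dependency graph {file: [dependencies]}
--         start_nodes: Starting files to propagate from
--         max_depth: Maximum propagation depth
--         propagation_type: Type of propagation (traffic, dependency, data, auth)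
--
--     Returns:
--         List of impacted files in order of impact
--     """
--     visited = set()
--     queue = deque([(n, 0) for n in start_nodes])
--     impacted = []
--
--     while queue:
--         node, depth = queue.popleft()
--         if node in visited or depth > max_depth:
--             continue
--
--         visited.add(node)
--         impacted.append(node)
--
--         # Find downstream dependencies
--         for downstream, deps in dep_graph.items():
--             if node in deps and downstream not in visited:
--                 # Apply propagation rules based on type
--                 if _should_propagate(node, downstream, propagation_type):
--                     queue.append((downstream, depth + 1))
--
--     return impacted
--
-- def _should_propagate(from_node: str, to_node: str, propagation_type: str) -> bool:
--     """Determine if stress should propagate based on file types and propagation type"""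
--
--     if propagation_type == "traffic":
--         # Traffic flows from UI -> API -> Database
--         traffic_flow = [
--             (".tsx", ".ts"),  # Component to hook/service
--             (".jsx", ".js"),  # Component to service
--             (".ts", ".ts"),   # Service to service
--             ("api/", "models/"),  # API to models
--         ]
--         return any(from_node.endswith(src) and to_node.endswith(dst) for src, dst in traffic_flow)
--
--     elif propagation_type == "dependency":
--         # Dependency propagation is bidirectional
--         return True
--
--     elif propagation_type == "data":
--         # Data flows Database -> API -> UI
--         return "model" in from_node.lower() or "db" in from_node.lower()
--
--     elif propagation_type == "auth":
--         # Auth flows through middleware and guards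
--         auth_keywords = ["auth", "middleware", "guard", "session"]
--         return any(keyword in from_node.lower() for keyword in auth_keywords)
--
--     return True
-- ===== SOURCE B (Python) =====
-- def _should_propagate(from_node: str, to_node: str, propagation_type: str) -> bool:
--     """Determine if stress should propagate based on file types and propagation type"""
--     if propagation_type == "traffic":
--         traffic_flow = [
--             (".tsx", ".ts"),
--             (".jsx", ".js"),
--             (".ts", ".ts"),
--             ("api/", "models/"),
--         ]
--         return any(from_node.endswith(src) and to_node.endswith(dst) for src, dst in traffic_flow)
--     elif propagation_type == "dependency":
--         return True
--     elif propagation_type == "data":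
--         return "model" in from_node.lower() or "db" in from_node.lower()
--     elif propagation_type == "auth":
--         auth_keywords = ["auth", "middleware", "guard", "session"]
--         return any(keyword in from_node.lower() for keyword in auth_keywords)
--     return True
--
-- def propagate_stress(
--     dep_graph: dict,
--     start_nodes: list,
--     max_depth: int = 3,
--     propagation_type: str = "traffic"
-- ):
--     # Reverse-adjacency index built ONCE (dependency -> dependents, graph order),
--     # then LEVEL-SYNCHRONOUS BFS: whole frontier per depth, no (node, depth) queue.
--     dependents = {}
--     for downstream, deps in dep_graph.items():
--         for dep in dict.fromkeys(deps):
--             dependents.setdefault(dep, []).append(downstream)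
--
--     visited = set()
--     impacted = []
--     frontier = list(start_nodes)
--     depth = 0
--     while frontier and depth <= max_depth:
--         nxt = []
--         for node in frontier:
--             if node in visited:
--                 continue
--             visited.add(node)
--             impacted.append(node)
--             nxt.extend(w for w in dependents.get(node, ())
--                        if w not in visited and _should_propagate(node, w, propagation_type))
--         frontier = nxt
--         depth += 1
--     return impacted
-- ===== Notes on version B (the rewrite author's own statement) =====
-- stated objective: faster
-- what changed: B precomputes a reverse-adjacency index (dependency -> dependents) once and runs a level-synchronous BFS (whole frontier per depth, no (node,depth) queue), replacing A's full-graph rescan on every popped node.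
import Mathlib
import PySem

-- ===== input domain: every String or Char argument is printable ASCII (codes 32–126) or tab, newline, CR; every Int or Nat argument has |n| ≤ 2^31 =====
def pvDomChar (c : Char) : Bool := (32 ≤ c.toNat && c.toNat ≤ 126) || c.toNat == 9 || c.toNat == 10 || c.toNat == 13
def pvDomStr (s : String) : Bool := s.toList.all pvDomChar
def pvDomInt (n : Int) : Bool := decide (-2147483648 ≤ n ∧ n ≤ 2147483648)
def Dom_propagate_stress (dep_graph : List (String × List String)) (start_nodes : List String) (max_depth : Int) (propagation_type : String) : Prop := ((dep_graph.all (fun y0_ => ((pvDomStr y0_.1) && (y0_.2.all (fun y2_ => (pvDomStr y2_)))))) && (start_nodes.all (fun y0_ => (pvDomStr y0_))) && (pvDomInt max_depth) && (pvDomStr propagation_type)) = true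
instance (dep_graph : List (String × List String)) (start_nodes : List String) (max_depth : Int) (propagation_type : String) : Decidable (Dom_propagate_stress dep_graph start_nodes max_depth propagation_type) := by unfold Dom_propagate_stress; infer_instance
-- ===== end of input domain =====

-- B builds a reverse-adjacency index (dependency -> dependents) once and runs a level-synchronous
-- BFS (whole frontier per depth) instead of A's per-node rescans of the graph through a (node,depth)
-- queue; the return values are proved equal.

-- ===== PORT A =====

-- _should_propagate, shared helper of both Pythons (pure string predicate)
def shouldPropagate (from_node : String) (to_node : String) (propagation_type : String) : Bool :=
  if propagation_type == "traffic" then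
    [(".tsx", ".ts"), (".jsx", ".js"), (".ts", ".ts"), ("api/", "models/")].any
      (fun p => PySem.Str.endswith from_node p.1 && PySem.Str.endswith to_node p.2)
  else if propagation_type == "dependency" then
    true
  else if propagation_type == "data" then
    PySem.Str.isIn "model" (PySem.Str.lower from_node) || PySem.Str.isIn "db" (PySem.Str.lower from_node)
  else if propagation_type == "auth" then
    ["auth", "middleware", "guard", "session"].any
      (fun k => PySem.Str.isIn k (PySem.Str.lower from_node))
  else
    true

-- Termination measure for A's BFS queue: `cands` over-approximates every node name that can
-- ever be enqueued, `bound` the number of enqueues a single pop can perform.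
def pvMeas (cands : List String) (bound : Nat) (visited : List String) (queue : List (String × Int)) : Nat :=
  ((cands ++ queue.map Prod.fst).toFinset \ visited.toFinset).card * (bound + 1) + queue.length

lemma pvMeas_skip (cands : List String) (bound : Nat) (visited : List String)
    (node : String) (depth : Int) (rest : List (String × Int)) :
    pvMeas cands bound visited rest < pvMeas cands bound visited ((node, depth) :: rest) := by
  unfold pvMeas
  have hsub : (cands ++ rest.map Prod.fst).toFinset ⊆
      (cands ++ ((node, depth) :: rest).map Prod.fst).toFinset := by
    intro x hx; simp at hx ⊢; tauto
  have h1 := Finset.card_le_card (Finset.sdiff_subset_sdiff hsub (le_refl visited.toFinset))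
  have h2 := Nat.mul_le_mul_right (bound + 1) h1
  simp only [List.length_cons]
  omega

lemma pvMeas_process (cands : List String) (bound : Nat) (visited : List String)
    (node : String) (depth : Int) (rest : List (String × Int)) (queue' : List (String × Int))
    (hnode : node ∉ visited)
    (hlen : queue'.length ≤ rest.length + bound)
    (hmem : ∀ x ∈ queue'.map Prod.fst, x ∈ cands ∨ x ∈ rest.map Prod.fst) :
    pvMeas cands bound (PySem.Set.add visited node) queue' <
      pvMeas cands bound visited ((node, depth) :: rest) := by
  unfold pvMeas
  have hvis : ∀ x : String, x ∈ (PySem.Set.add visited node).toFinset ↔ (x = node ∨ x ∈ visited) := by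
    intro x
    simp only [PySem.Set.add]
    split
    · next hc =>
      have := PySem.Set.contains_iff visited node |>.mp hc
      simp only [List.mem_toFinset]
      constructor
      · exact Or.inr
      · rintro (rfl | hx); exacts [this, hx]
    · simp [List.toFinset_append]
  have hssub : ((cands ++ queue'.map Prod.fst).toFinset \ (PySem.Set.add visited node).toFinset) ⊂
      ((cands ++ ((node, depth) :: rest).map Prod.fst).toFinset \ visited.toFinset) := by
    rw [Finset.ssubset_iff_of_subset]
    · exact ⟨node, by simp [hnode], by simp [hvis]⟩
    · intro x hx
      simp only [Finset.mem_sdiff, List.mem_toFinset, List.mem_append, hvis] at hx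
      push Not at hx
      obtain ⟨hx1, hx2, hx3⟩ := hx
      simp only [Finset.mem_sdiff, List.mem_toFinset, List.mem_append, List.map_cons, List.mem_cons]
      refine ⟨?_, hx3⟩
      rcases hx1 with h | h
      · exact Or.inl h
      · rcases hmem x h with h' | h'
        · exact Or.inl h'
        · exact Or.inr (Or.inr h')
  have hcard := Finset.card_lt_card hssub
  set c' := ((cands ++ queue'.map Prod.fst).toFinset \ (PySem.Set.add visited node).toFinset).card with hc'
  set c := ((cands ++ ((node, depth) :: rest).map Prod.fst).toFinset \ visited.toFinset).card with hc
  have hmul : (c' + 1) * (bound + 1) ≤ c * (bound + 1) := Nat.mul_le_mul_right _ hcard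
  calc c' * (bound + 1) + queue'.length
      ≤ c' * (bound + 1) + (rest.length + bound) := Nat.add_le_add_left hlen _
    _ < (c' + 1) * (bound + 1) + rest.length := by rw [Nat.succ_mul]; omega
    _ ≤ c * (bound + 1) + rest.length := Nat.add_le_add_right hmul _
    _ < c * (bound + 1) + ((node, depth) :: rest).length := by simp

-- One pop's enqueue loop: each item appends at most one entry, and only its payload.
lemma foldl_enq_facts {β : Type} (pay : β → String × Int)
    (step : List (String × Int) → β → List (String × Int))
    (h : ∀ q b, step q b = q ∨ step q b = q ++ [pay b]) :
    ∀ (l : List β) (q : List (String × Int)),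
      (l.foldl step q).length ≤ q.length + l.length ∧
      (∀ e ∈ l.foldl step q, e ∈ q ∨ ∃ b ∈ l, e = pay b) := by
  intro l
  induction l with
  | nil => intro q; simp
  | cons b t ih =>
    intro q
    rcases h q b with hb | hb <;> simp only [List.foldl_cons, hb] <;>
      refine ⟨?_, ?_⟩ <;> first
      | (have := (ih q).1; simp; omega)
      | (have := (ih (q ++ [pay b])).1; simp at this ⊢; omega)
      | (intro e he
         rcases (ih _).2 e he with h1 | ⟨b', hb', he'⟩
         · first
           | exact Or.inl h1
           | (simp at h1; rcases h1 with h1 | h1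
              · exact Or.inl h1
              · exact Or.inr ⟨b, by simp, h1⟩)
         · exact Or.inr ⟨b', by simp [hb'], he'⟩)

-- inner for-loop of A: scan every dep_graph item, enqueue matching downstreams
def pvEnqA (dep_graph : List (String × List String)) (node : String) (visited' : PySem.Set String)
    (depth : Int) (pt : String) (q : List (String × Int)) : List (String × Int) :=
  dep_graph.foldl (fun q p =>
    if p.2.contains node && !(PySem.Set.contains visited' p.1) then
      (if shouldPropagate node p.1 pt then q ++ [(p.1, depth + 1)] else q)
    else q) q

def pvLoopA (dep_graph : List (String × List String)) (max_depth : Int) (pt : String)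
    (visited : PySem.Set String) (queue : List (String × Int)) (impacted : List String) : List String :=
  match queue with
  | [] => impacted
  | (node, depth) :: rest =>
    if PySem.Set.contains visited node || depth > max_depth then
      pvLoopA dep_graph max_depth pt visited rest impacted
    else
      pvLoopA dep_graph max_depth pt (PySem.Set.add visited node)
        (pvEnqA dep_graph node (PySem.Set.add visited node) depth pt rest)
        (impacted ++ [node])
termination_by pvMeas (dep_graph.map Prod.fst) dep_graph.length visited queue
decreasing_by
  · exact pvMeas_skip _ _ _ _ _ _
  · rename_i h
    have hnode : node ∉ visited := fun hm =>
      h (by simp; exact Or.inl hm)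
    have hfacts := foldl_enq_facts (fun p => (p.1, depth + 1))
      (fun q p =>
        if p.2.contains node && !(PySem.Set.contains (PySem.Set.add visited node) p.1) then
          (if shouldPropagate node p.1 pt then q ++ [(p.1, depth + 1)] else q)
        else q)
      (by intro q b; dsimp only; split_ifs <;> simp) dep_graph rest
    rw [pvEnqA] at *
    refine pvMeas_process _ _ _ _ _ _ _ hnode hfacts.1 ?_
    intro x hx
    obtain ⟨e, he, rfl⟩ := List.mem_map.mp hx
    rcases hfacts.2 e he with h1 | ⟨p, hp, rfl⟩
    · exact Or.inr (List.mem_map.mpr ⟨e, h1, rfl⟩)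
    · exact Or.inl (List.mem_map.mpr ⟨p, hp, rfl⟩)

def propagate_stress (dep_graph : List (String × List String)) (start_nodes : List String) (max_depth : Int) (propagation_type : String) : List String :=
  pvLoopA dep_graph max_depth propagation_type PySem.Set.empty
    (start_nodes.map (fun n => (n, (0 : Int)))) []

-- ===== PORT B =====

-- dependents = {}; for downstream, deps in dep_graph.items(): for dep in dict.fromkeys(deps): dependents.setdefault(dep, []).append(downstream)
def pvBuildRev (dep_graph : List (String × List String)) : PySem.Dict String (List String) :=
  dep_graph.foldl (fun rev p =>
    (PySem.List.dedup p.2).foldl (fun rev d => rev.insert d (rev.getD d [] ++ [p.1])) rev)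
    PySem.Dict.empty

-- body of B's inner "for node in frontier" loop; state = (visited, impacted, nxt)
def pvStepL (dependents : PySem.Dict String (List String)) (pt : String)
    (st : PySem.Set String × List String × List String) (node : String) :
    PySem.Set String × List String × List String :=
  if PySem.Set.contains st.1 node then st
  else
    let visited' := PySem.Set.add st.1 node
    (visited', st.2.1 ++ [node],
      st.2.2 ++ (dependents.getD node []).filter
        (fun w => !(PySem.Set.contains visited' w) && shouldPropagate node w pt))

-- Conservative termination facts about one level of B's loop (stated first: the loop cites them).
lemma pvStepL_fold_facts (dependents : PySem.Dict String (List String)) (pt : String) :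
    ∀ (cur : List String) (v : PySem.Set String) (imp nx : List String),
      (∀ x ∈ v, x ∈ (cur.foldl (pvStepL dependents pt) (v, imp, nx)).1) ∧
      (∀ x ∈ (cur.foldl (pvStepL dependents pt) (v, imp, nx)).1, x ∈ v ∨ x ∈ cur) ∧
      (∀ n ∈ cur, n ∈ (cur.foldl (pvStepL dependents pt) (v, imp, nx)).1) ∧
      (∀ w ∈ (cur.foldl (pvStepL dependents pt) (v, imp, nx)).2.2,
          w ∈ nx ∨ w ∈ dependents.values.flatten) := by
  intro cur
  induction cur with
  | nil =>
    intro v imp nx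
    exact ⟨fun x hx => hx, fun x hx => Or.inl hx, fun n hn => absurd hn (List.not_mem_nil),
      fun w hw => Or.inl hw⟩
  | cons node cs ih =>
    intro v imp nx
    simp only [List.foldl_cons]
    by_cases hc : PySem.Set.contains v node = true
    · have hmem : node ∈ v := (PySem.Set.contains_iff v node).mp hc
      have hstep : pvStepL dependents pt (v, imp, nx) node = (v, imp, nx) := by
        simp [pvStepL, hmem]
      rw [hstep]
      obtain ⟨ih1, ih2, ih3, ih4⟩ := ih v imp nx
      refine ⟨ih1, fun x hx => ?_, fun n hn => ?_, ih4⟩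
      · rcases ih2 x hx with h | h
        · exact Or.inl h
        · exact Or.inr (List.mem_cons_of_mem _ h)
      · rcases List.mem_cons.mp hn with rfl | hn
        · exact ih1 _ ((PySem.Set.contains_iff v n).mp hc)
        · exact ih3 n hn
    · have hmem : node ∉ v := fun h => hc ((PySem.Set.contains_iff v node).mpr h)
      have hstep : pvStepL dependents pt (v, imp, nx) node =
          (PySem.Set.add v node, imp ++ [node],
            nx ++ (dependents.getD node []).filter
              (fun w => !(PySem.Set.contains (PySem.Set.add v node) w) && shouldPropagate node w pt)) := by
        simp [pvStepL, hmem]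
      rw [hstep]
      obtain ⟨ih1, ih2, ih3, ih4⟩ := ih (PySem.Set.add v node) (imp ++ [node])
        (nx ++ (dependents.getD node []).filter
          (fun w => !(PySem.Set.contains (PySem.Set.add v node) w) && shouldPropagate node w pt))
      refine ⟨fun x hx => ih1 x ((PySem.Set.mem_add v node x).mpr (Or.inl hx)), fun x hx => ?_,
        fun n hn => ?_, fun w hw => ?_⟩
      · rcases ih2 x hx with h | h
        · rcases (PySem.Set.mem_add v node x).mp h with h | rfl
          · exact Or.inl h
          · exact Or.inr (List.mem_cons_self)
        · exact Or.inr (List.mem_cons_of_mem _ h)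
      · rcases List.mem_cons.mp hn with rfl | hn
        · exact ih1 _ ((PySem.Set.mem_add v n n).mpr (Or.inr rfl))
        · exact ih3 n hn
      · rcases ih4 w hw with h | h
        · rcases List.mem_append.mp h with h | h
          · exact Or.inl h
          · have hm := List.mem_of_mem_filter h
            right
            rcases hg : dependents.get? node with _ | vv
            · rw [PySem.Dict.getD_eq_get?_getD, hg] at hm; simp at hm
            · rw [PySem.Dict.getD_eq_get?_getD, hg] at hm
              have hv : vv ∈ dependents.values := by
                have hi := PySem.Dict.mem_items_of_get?_eq_some dependents hg
                simpa [PySem.Dict.values] using ⟨node, hi⟩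
              exact List.mem_flatten.mpr ⟨vv, hv, hm⟩
        · exact Or.inr h

-- if every frontier node is already visited, the level changes nothing
lemma pvStepL_fold_visited (dependents : PySem.Dict String (List String)) (pt : String) :
    ∀ (cur : List String) (v : PySem.Set String) (imp nx : List String),
      (∀ n ∈ cur, n ∈ v) → cur.foldl (pvStepL dependents pt) (v, imp, nx) = (v, imp, nx) := by
  intro cur
  induction cur with
  | nil => intro v imp nx _; rfl
  | cons node cs ih =>
    intro v imp nx hall
    have hmem : node ∈ v := hall node List.mem_cons_self
    simp only [List.foldl_cons]
    rw [show pvStepL dependents pt (v, imp, nx) node = (v, imp, nx) by simp [pvStepL, hmem]]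
    exact ih v imp nx (fun n hn => hall n (List.mem_cons_of_mem _ hn))

-- measure for B's level loop: unvisited candidate count, tie-broken by the frontier emptying
def pvMeasL (cands : List String) (visited : List String) (frontier : List String) : Nat :=
  ((cands ++ frontier).toFinset \ visited.toFinset).card * 2 + (if frontier.isEmpty then 0 else 1)

-- while frontier and depth <= max_depth: one level per iteration
def pvLoopL (dependents : PySem.Dict String (List String)) (max_depth : Int) (pt : String)
    (visited : PySem.Set String) (frontier : List String) (depth : Int) (impacted : List String) : List String :=
  if frontier.isEmpty || depth > max_depth then impacted
  else
    let st := frontier.foldl (pvStepL dependents pt) (visited, impacted, [])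
    pvLoopL dependents max_depth pt st.1 st.2.2 (depth + 1) st.2.1
termination_by pvMeasL dependents.values.flatten visited frontier
decreasing_by
  rename_i h
  simp only [List.foldl_attach]
  have hfne : frontier ≠ [] := by
    intro hnil; exact h (by simp [hnil])
  obtain ⟨f1, f2, f3, f4⟩ := pvStepL_fold_facts dependents pt frontier visited impacted []
  by_cases hall : ∀ n ∈ frontier, n ∈ visited
  · rw [pvStepL_fold_visited dependents pt frontier visited impacted [] hall]
    dsimp only
    unfold pvMeasL
    have hsub : (dependents.values.flatten ++ ([] : List String)).toFinset ⊆
        (dependents.values.flatten ++ frontier).toFinset := by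
      intro x hx
      simp only [List.toFinset_append, Finset.mem_union, List.mem_toFinset] at hx ⊢
      rcases hx with h | h
      · exact Or.inl h
      · exact absurd h (List.not_mem_nil)
    have hle := Finset.card_le_card (Finset.sdiff_subset_sdiff hsub (le_refl visited.toFinset))
    rw [if_pos List.isEmpty_nil, if_neg (by simp [hfne])]
    omega
  · push Not at hall
    obtain ⟨n, hn, hnv⟩ := hall
    unfold pvMeasL
    have hssub : ((dependents.values.flatten ++
          (frontier.foldl (pvStepL dependents pt) (visited, impacted, [])).2.2).toFinset \
          (frontier.foldl (pvStepL dependents pt) (visited, impacted, [])).1.toFinset) ⊂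
        ((dependents.values.flatten ++ frontier).toFinset \ visited.toFinset) := by
      rw [Finset.ssubset_iff_of_subset]
      · refine ⟨n, by simp [hn, hnv], ?_⟩
        simp only [Finset.mem_sdiff, List.mem_toFinset, not_and, not_not]
        intro _; exact f3 n hn
      · intro x hx
        simp only [Finset.mem_sdiff, List.mem_toFinset, List.mem_append] at hx ⊢
        obtain ⟨hx1, hx2⟩ := hx
        have hxv : x ∉ visited := fun hv => hx2 (f1 x hv)
        refine ⟨?_, hxv⟩
        rcases hx1 with h | h
        · exact Or.inl h
        · rcases f4 x h with h' | h'
          · simp at h'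
          · exact Or.inl h'
    have hcard := Finset.card_lt_card hssub
    have h2 : frontier.isEmpty = false := by simp [hfne]
    rw [h2]
    split <;> omega

def propagate_stress_alt (dep_graph : List (String × List String)) (start_nodes : List String) (max_depth : Int) (propagation_type : String) : List String :=
  pvLoopL (pvBuildRev dep_graph) max_depth propagation_type PySem.Set.empty start_nodes 0 []

-- ===== PRECONDITION & SPEC =====
def Spec_propagate_stress (dep_graph : List (String × List String)) (start_nodes : List String) (max_depth : Int) (propagation_type : String) (out : List String) : Prop := out = propagate_stress_alt dep_graph start_nodes max_depth propagation_type
instance (dep_graph : List (String × List String)) (start_nodes : List String) (max_depth : Int) (propagation_type : String) (out : List String) : Decidable (Spec_propagate_stress dep_graph start_nodes max_depth propagation_type out) := by unfold Spec_propagate_stress; infer_instance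

-- ===== CLAIM (what is proved, stated in full; the proofs are below) =====
def Claim_equal_propagate_stress : Prop := ∀ (dep_graph : List (String × List String)) (start_nodes : List String) (max_depth : Int) (propagation_type : String), Dom_propagate_stress dep_graph start_nodes max_depth propagation_type → Spec_propagate_stress dep_graph start_nodes max_depth propagation_type (propagate_stress dep_graph start_nodes max_depth propagation_type)

-- ===== LEMMAS AND PROOFS =====

-- One setdefault/append pass over a duplicate-free dependency list of a single graph entry.
lemma inner_fold_getD (w : String) :
    ∀ (ds : List String) (rev : PySem.Dict String (List String)) (n : String), ds.Nodup →
      (ds.foldl (fun rev d => rev.insert d (rev.getD d [] ++ [w])) rev).getD n [] =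
        rev.getD n [] ++ (if n ∈ ds then [w] else []) := by
  intro ds
  induction ds with
  | nil => intro rev n _; simp
  | cons d t ih =>
    intro rev n hnd
    simp only [List.foldl_cons]
    rw [ih _ n (List.nodup_cons.mp hnd).2, PySem.Dict.getD_insert]
    by_cases hdn : n = d
    · subst hdn
      simp [(List.nodup_cons.mp hnd).1]
    · simp [hdn]

-- The reverse index answers exactly A's per-node scan: the downstreams whose deps contain n, in order.
lemma getD_buildRev_go :
    ∀ (dg : List (String × List String)) (rev : PySem.Dict String (List String)) (n : String),
      (dg.foldl (fun rev p =>
          (PySem.List.dedup p.2).foldl (fun rev d => rev.insert d (rev.getD d [] ++ [p.1])) rev)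
        rev).getD n []
        = rev.getD n [] ++ (dg.filter (fun p => p.2.contains n)).map Prod.fst := by
  intro dg
  induction dg with
  | nil => simp
  | cons p t ih =>
    intro rev n
    simp only [List.foldl_cons]
    rw [ih, inner_fold_getD p.1 _ _ n (PySem.List.nodup_dedup _)]
    by_cases hc : n ∈ p.2
    · simp [hc]
    · simp [hc]

lemma getD_buildRev (dg : List (String × List String)) (n : String) :
    (pvBuildRev dg).getD n [] = (dg.filter (fun p => p.2.contains n)).map Prod.fst := by
  unfold pvBuildRev
  rw [getD_buildRev_go]
  simp

-- closed form of A's enqueue scan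
lemma enqA_closed (node : String) (v : PySem.Set String) (d : Int) (pt : String) :
    ∀ (dg : List (String × List String)) (q : List (String × Int)),
      pvEnqA dg node v d pt q =
        q ++ ((dg.filter (fun p =>
            p.2.contains node && !(PySem.Set.contains v p.1) && shouldPropagate node p.1 pt)).map
          (fun p => (p.1, d + 1))) := by
  intro dg
  induction dg with
  | nil => intro q; simp [pvEnqA]
  | cons p t ih =>
    intro q
    have e : pvEnqA (p :: t) node v d pt q = pvEnqA t node v d pt
        (if (p.2.contains node && !(PySem.Set.contains v p.1)) = true then
          (if shouldPropagate node p.1 pt = true then q ++ [(p.1, d + 1)] else q) else q) := rfl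
    rw [e, ih]
    by_cases h1 : node ∈ p.2 <;>
      by_cases h2 : p.1 ∈ v <;>
      by_cases h3 : shouldPropagate node p.1 pt = true <;>
      simp [h1, h2, h3]

-- B's filtered neighbour list is exactly what A's scan enqueues
lemma newB_eq_newA (dg : List (String × List String)) (node : String) (v : PySem.Set String)
    (d : Int) (pt : String) :
    (((pvBuildRev dg).getD node []).filter
        (fun w => !(PySem.Set.contains v w) && shouldPropagate node w pt)).map (fun n => (n, d + 1))
      = (dg.filter (fun p =>
          p.2.contains node && !(PySem.Set.contains v p.1) && shouldPropagate node p.1 pt)).map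
        (fun p => (p.1, d + 1)) := by
  rw [getD_buildRev, List.filter_map, List.filter_filter, List.map_map]
  exact congrArg _ (List.filter_congr (fun x _ => by
    cases h1 : x.2.contains node <;> cases h2 : PySem.Set.contains v x.1 <;>
      cases h3 : shouldPropagate node x.1 pt <;> simp_all [Function.comp]))

-- processing one whole level of A's queue = one foldl of B's step function
lemma level_eq (dg : List (String × List String)) (md : Int) (pt : String) :
    ∀ (cur : List String) (v : PySem.Set String) (imp nxt : List String) (d : Int), d ≤ md →
      pvLoopA dg md pt v (cur.map (fun n => (n, d)) ++ nxt.map (fun n => (n, d + 1))) imp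
        = pvLoopA dg md pt (cur.foldl (pvStepL (pvBuildRev dg) pt) (v, imp, nxt)).1
            ((cur.foldl (pvStepL (pvBuildRev dg) pt) (v, imp, nxt)).2.2.map (fun n => (n, d + 1)))
            (cur.foldl (pvStepL (pvBuildRev dg) pt) (v, imp, nxt)).2.1 := by
  intro cur
  induction cur with
  | nil => intro v imp nxt d _; rfl
  | cons node cs ih =>
    intro v imp nxt d hd
    simp only [List.map_cons, List.cons_append, List.foldl_cons]
    rw [pvLoopA]
    by_cases hmem : node ∈ v
    · rw [if_pos (by simp [hmem])]
      rw [show pvStepL (pvBuildRev dg) pt (v, imp, nxt) node = (v, imp, nxt) by simp [pvStepL, hmem]]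
      exact ih v imp nxt d hd
    · rw [if_neg (by simp [hmem]; omega)]
      rw [show pvStepL (pvBuildRev dg) pt (v, imp, nxt) node =
          (PySem.Set.add v node, imp ++ [node],
            nxt ++ ((pvBuildRev dg).getD node []).filter
              (fun w => !(PySem.Set.contains (PySem.Set.add v node) w) && shouldPropagate node w pt))
        by simp [pvStepL, hmem]]
      rw [enqA_closed, ← newB_eq_newA dg node (PySem.Set.add v node) d pt]
      rw [List.append_assoc, ← List.map_append]
      exact ih (PySem.Set.add v node) (imp ++ [node]) _ d hd

-- once every queued depth exceeds max_depth, A only skips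
lemma loopA_all_deep (dg : List (String × List String)) (md : Int) (pt : String) :
    ∀ (q : List (String × Int)) (v : PySem.Set String) (imp : List String),
      (∀ e ∈ q, e.2 > md) → pvLoopA dg md pt v q imp = imp := by
  intro q
  induction q with
  | nil => intro v imp _; rw [pvLoopA]
  | cons e rest ih =>
    intro v imp hall
    obtain ⟨n, d⟩ := e
    rw [pvLoopA, if_pos (by simp; right; exact hall (n, d) List.mem_cons_self)]
    exact ih v imp (fun e he => hall e (List.mem_cons_of_mem _ he))

-- A's FIFO queue processes exactly B's levels, in the same order
lemma bridge (dg : List (String × List String)) (md : Int) (pt : String) :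
    ∀ (v : PySem.Set String) (cur : List String) (d : Int) (imp : List String),
      pvLoopL (pvBuildRev dg) md pt v cur d imp
        = pvLoopA dg md pt v (cur.map (fun n => (n, d))) imp := by
  intro v cur d imp
  induction v, cur, d, imp using pvLoopL.induct (dependents := pvBuildRev dg) (max_depth := md) (pt := pt) with
  | case1 v cur d imp h =>
    rw [pvLoopL, if_pos h]
    rcases (by simpa using h : cur.isEmpty = true ∨ md < d) with h1 | h1
    · rw [List.isEmpty_iff.mp h1]
      rw [show (([] : List String).map (fun n => (n, d))) = [] from rfl, pvLoopA]
    · refine (loopA_all_deep dg md pt _ v imp ?_).symm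
      intro e he
      obtain ⟨n, hn, rfl⟩ := List.mem_map.mp he
      simpa using h1
  | case2 v cur d imp h st ih =>
    have hd : d ≤ md := by
      by_contra hgt
      exact h (by simp; exact Or.inr (by omega))
    have hst : st = List.foldl (pvStepL (pvBuildRev dg) pt) (v, imp, []) cur := by
      have h0 : st = List.foldl (fun s x => pvStepL (pvBuildRev dg) pt s x.1)
          (v, imp, []) cur.attach := rfl
      rw [h0, List.foldl_attach]
    have hgoal : pvLoopL (pvBuildRev dg) md pt v cur d imp =
        pvLoopL (pvBuildRev dg) md pt st.1 st.2.2 (d + 1) st.2.1 := by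
      rw [pvLoopL, if_neg h, hst]
    rw [hgoal, ih, hst]
    rw [← level_eq dg md pt cur v imp [] d hd, List.map_nil, List.append_nil]

-- ===== VERDICT (by name: the statement is the Claim_ definition above) =====
theorem propagate_stress_spec : Claim_equal_propagate_stress := by
  intro dg sn md pt _
  unfold Spec_propagate_stress propagate_stress propagate_stress_alt
  exact (bridge dg md pt PySem.Set.empty sn 0 []).symm
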